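-- pv_equiv track=rewrite | github.com/georgedunnery/Spaceship | spaceship.py | compare_scores
-- ===== SOURCE A (Python) =====
-- def compare_scores(leaderboard):
--     """
--     Parameters: List containing the strings of data read from the scores.txt
--     file by the extract function
--     Does: Processes the data in the scores file, removing the names to pass
--     a list of integers to the top_dog function, which then responds with
--     the highest score from the file
--     Returns: The highest score from the file
--     """
--     try:
--         score_list = []
--         for prev_score in leaderboard:
--             prev_score = prev_score.split(' ')
--             score_list.append(int(prev_score[1]))
--         return top_dog(score_list)
--     except IndexError:
--         return 0
--
-- def top_dog(score_list):
--     """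
--     Parameter: List of scores from the scores file
--     Does: Seeks the highest score
--     Returns: Largest integer in the list, or zero if there's an IndexError
--     """
--     try:
--         if len(score_list) == 1:
--             return score_list[0]
--         else:
--             if score_list[0] > top_dog(score_list[1:]):
--                 return score_list[0]
--             else:
--                 return top_dog(score_list[1:])
--     except IndexError:
--         return 0
-- ===== SOURCE B (Python) =====
-- def compare_scores(leaderboard):
--     best = None
--     for line in leaderboard:
--         parts = line.split(' ')
--         if len(parts) < 2:
--             return 0
--         val = int(parts[1])
--         if best is None or val > best:
--             best = val
--     return best if best is not None else 0
-- ===== Notes on version B (the rewrite author's own statement) =====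
-- stated objective: simpler
-- what changed: Single streaming pass with a running best (None-initialised) and an explicit length check, replacing A's build-a-full-list pass followed by a naive recursive max that recomputes top_dog of the tail twice per element.
import Mathlib
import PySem

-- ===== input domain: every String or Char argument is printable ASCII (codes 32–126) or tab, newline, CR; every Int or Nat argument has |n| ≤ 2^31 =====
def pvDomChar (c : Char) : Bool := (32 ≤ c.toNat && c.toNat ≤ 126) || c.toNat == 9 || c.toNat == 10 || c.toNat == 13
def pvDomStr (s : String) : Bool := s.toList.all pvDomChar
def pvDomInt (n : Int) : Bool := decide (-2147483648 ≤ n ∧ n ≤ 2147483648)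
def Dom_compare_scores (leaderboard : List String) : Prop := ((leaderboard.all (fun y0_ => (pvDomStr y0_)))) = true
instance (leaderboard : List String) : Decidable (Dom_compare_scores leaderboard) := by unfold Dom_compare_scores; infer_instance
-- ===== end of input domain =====

-- B replaces A's build-a-list-then-recursive-max with one streaming pass keeping a running best (objective: simpler).

-- ===== PORT A =====
-- top_dog: score_list[0] on [] raises IndexError, caught → 0
def top_dog (score_list : List Int) : Int :=
  match score_list with
  | [] => 0
  | [x] => x
  | x :: rest => if x > top_dog rest then x else top_dog rest

-- the loop of A: builds score_list; none = IndexError (missing parts[1]) or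
-- ValueError (unparsable int; excluded by Pre_, where A raises)
def pvBuildScores (leaderboard : List String) : Option (List Int) :=
  match leaderboard with
  | [] => some []
  | l :: rest =>
    match PySem.List.pyGet? ((PySem.Str.split? l " ").getD []) 1 with
    | none => none
    | some s =>
      match PySem.Int.ofStr? s with
      | none => none
      | some v => (pvBuildScores rest).map (fun t => v :: t)

def compare_scores (leaderboard : List String) : Int :=
  match pvBuildScores leaderboard with
  | none => 0
  | some score_list => top_dog score_list

-- ===== PORT B =====
-- the single pass of B with running best; `none => 0` on an unparsable int is
-- the ValueError case, excluded by Pre_ (B raises there too)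
def pvAltGo (leaderboard : List String) (best : Option Int) : Int :=
  match leaderboard with
  | [] => best.getD 0
  | l :: rest =>
    let parts := (PySem.Str.split? l " ").getD []
    if parts.length < 2 then 0
    else
      match PySem.Int.ofStr? ((PySem.List.pyGet? parts 1).getD "") with
      | none => 0
      | some v =>
        pvAltGo rest (some (match best with
          | none => v
          | some b => if v > b then v else b))

def compare_scores_alt (leaderboard : List String) : Int :=
  pvAltGo leaderboard none

-- ===== PRECONDITION & SPEC =====
-- Pre_ excludes exactly the inputs where Python raises ValueError: a line whose
-- parts[1] is not an int literal, occurring before any line with fewer than 2 parts.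
def Pre_compare_scores (leaderboard : List String) : Prop :=
  ((leaderboard.takeWhile (fun s => 2 ≤ ((PySem.Str.split? s " ").getD []).length)).all
    (fun s => (PySem.Int.ofStr? ((PySem.List.pyGet? ((PySem.Str.split? s " ").getD []) 1).getD "")).isSome)) = true
instance (leaderboard : List String) : Decidable (Pre_compare_scores leaderboard) := by
  unfold Pre_compare_scores; infer_instance

def pvWitness_compare_scores : List String := ["alice 5", "bob 12", "carol -3"]

def Spec_compare_scores (leaderboard : List String) (out : Int) : Prop := out = compare_scores_alt leaderboard
instance (leaderboard : List String) (out : Int) : Decidable (Spec_compare_scores leaderboard out) := by unfold Spec_compare_scores; infer_instance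

-- ===== CLAIM (what is proved, stated in full; the proofs are below) =====
def Claim_equal_compare_scores : Prop := ∀ (leaderboard : List String), Dom_compare_scores leaderboard → Pre_compare_scores leaderboard → Spec_compare_scores leaderboard (compare_scores leaderboard)

-- ===== LEMMAS AND PROOFS =====

lemma foldl_max_pull (zs : List Int) (a b : Int) :
    max a (zs.foldl max b) = zs.foldl max (max a b) := by
  induction zs generalizing b with
  | nil => rfl
  | cons z zs ih =>
    simp only [List.foldl_cons]
    rw [ih (max b z), max_assoc]

lemma top_dog_cons (x : Int) (xs : List Int) : top_dog (x :: xs) = xs.foldl max x := by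
  induction xs generalizing x with
  | nil => simp [top_dog]
  | cons y ys ih =>
    show (if x > top_dog (y :: ys) then x else top_dog (y :: ys)) = _
    rw [ih y]
    have h : (if x > ys.foldl max y then x else ys.foldl max y) = max x (ys.foldl max y) := by
      by_cases h : ys.foldl max y < x
      · simp [h, max_eq_left h.le]
      · simp [h, max_eq_right (not_lt.mp h)]
    rw [h, foldl_max_pull]
    simp only [List.foldl_cons]

lemma foldl_max_some (xs : List Int) (b : Int) :
    (Option.some (xs.foldl max b)) = (xs.foldl (fun (o : Option Int) v =>
      some (match o with | none => v | some c => if v > c then v else c)) (some b)) := by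
  induction xs generalizing b with
  | nil => rfl
  | cons x xs ih =>
    simp only [List.foldl_cons]
    rw [← ih]
    congr 1
    by_cases h : b < x
    · simp [h, max_eq_right h.le]
    · simp [h, max_eq_left (not_lt.mp h)]

-- main generalized loop correspondence (no precondition needed: the ports
-- agree even on the ValueError lines, both returning 0 at the first bad line)
lemma pvMain (leaderboard : List String) (b : Option Int) :
    pvAltGo leaderboard b =
      match pvBuildScores leaderboard with
      | none => 0
      | some sl =>
        match (sl.foldl (fun (o : Option Int) v =>
          some (match o with | none => v | some c => if v > c then v else c)) b) with
        | none => 0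
        | some r => r := by
  induction leaderboard generalizing b with
  | nil =>
    cases b <;> simp [pvAltGo, pvBuildScores, Option.getD]
  | cons l rest ih =>
    simp only [pvAltGo, pvBuildScores]
    by_cases hlen : ((PySem.Str.split? l " ").getD []).length < 2
    · have hget : PySem.List.pyGet? ((PySem.Str.split? l " ").getD []) 1 = none := by
        simp [PySem.List.pyGet?, PySem.List.pyIdx?]
        omega
      simp [hlen, hget]
    · obtain ⟨p0, p1, pt, hp⟩ : ∃ p0 p1 pt, (PySem.Str.split? l " ").getD [] = p0 :: p1 :: pt := by
        cases hP : (PySem.Str.split? l " ").getD [] with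
        | nil => rw [hP] at hlen; simp at hlen
        | cons a t =>
          cases t with
          | nil => rw [hP] at hlen; simp at hlen
          | cons b' t' => exact ⟨a, b', t', rfl⟩
      have hs : PySem.List.pyGet? ((PySem.Str.split? l " ").getD []) 1 = some p1 := by
        rw [hp]; simp [PySem.List.pyGet?, PySem.List.pyIdx?]
      simp only [hlen, if_false, hs, Option.getD_some]
      cases hv : PySem.Int.ofStr? p1 with
      | none => simp
      | some v =>
        dsimp only
        rw [ih]
        cases hb : pvBuildScores rest with
        | none => simp
        | some sl => simp [List.foldl_cons]

theorem pvEqAll (leaderboard : List String) :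
    compare_scores leaderboard = compare_scores_alt leaderboard := by
  unfold compare_scores compare_scores_alt
  rw [pvMain]
  cases h : pvBuildScores leaderboard with
  | none => rfl
  | some sl =>
    cases sl with
    | nil => rfl
    | cons x xs =>
      simp only [List.foldl_cons]
      rw [← foldl_max_some xs x, top_dog_cons]

-- ===== VERDICT (by name: the statement is the Claim_ definition above) =====
theorem compare_scores_spec : Claim_equal_compare_scores := by
  intro lb _ _
  unfold Spec_compare_scores
  exact (pvEqAll lb)
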